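-- pv_equiv track=rewrite | github.com/8949897221/AI-performance-Analyzer-OS | src/utils/process_manager.py | _get_process_criticality
-- ===== SOURCE A (Python) =====
-- def _get_process_criticality(process_name: str) -> str:
--     """Determine process criticality for industrial systems"""
--     process_name = process_name.lower()
--     if any(keyword in process_name for keyword in ['plc', 'scada', 'control']):
--         return "Critical"
--     elif any(keyword in process_name for keyword in ['hmi', 'automation', 'robot']):
--         return "High"
--     elif any(keyword in process_name for keyword in ['monitor', 'sensor']):
--         return "Medium"
--     return "Low"
-- ===== SOURCE B (Python) =====
-- _KEYWORD_RANK = {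
--     'plc': 3, 'scada': 3, 'control': 3,
--     'hmi': 2, 'automation': 2, 'robot': 2,
--     'monitor': 1, 'sensor': 1,
-- }
-- _LEVEL_OF_RANK = {3: "Critical", 2: "High", 1: "Medium", 0: "Low"}
--
-- def _get_process_criticality(process_name: str) -> str:
--     """Determine process criticality for industrial systems"""
--     name = process_name.lower()
--     rank = max((r for k, r in _KEYWORD_RANK.items() if k in name), default=0)
--     return _LEVEL_OF_RANK[rank]
-- ===== Notes on version B (the rewrite author's own statement) =====
-- stated objective: alternative
-- what changed: B scores the name instead of branching: every keyword carries a numeric rank, one pass computes the maximum rank among all matching keywords, and a rank-to-label map produces the result, replacing A's priority-ordered if/elif short-circuit cascade.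
import Mathlib
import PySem

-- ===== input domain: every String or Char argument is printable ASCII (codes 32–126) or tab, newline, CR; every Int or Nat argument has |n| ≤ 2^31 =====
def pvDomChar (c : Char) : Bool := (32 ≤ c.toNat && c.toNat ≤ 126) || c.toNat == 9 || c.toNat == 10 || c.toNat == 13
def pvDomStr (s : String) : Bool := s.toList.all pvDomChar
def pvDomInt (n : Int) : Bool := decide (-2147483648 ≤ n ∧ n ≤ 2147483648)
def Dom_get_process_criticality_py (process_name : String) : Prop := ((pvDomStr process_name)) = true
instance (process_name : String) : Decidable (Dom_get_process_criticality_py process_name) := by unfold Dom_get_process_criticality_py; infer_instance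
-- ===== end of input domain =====

-- B scores the name (max rank over matching keywords, then rank -> label) instead of A's if/elif cascade. (objective: alternative)
-- ===== PORT A =====
def get_process_criticality_py (process_name : String) : String :=
  let process_name := PySem.Str.lower process_name
  if ["plc", "scada", "control"].any (fun keyword => PySem.Str.isIn keyword process_name) then
    "Critical"
  else if ["hmi", "automation", "robot"].any (fun keyword => PySem.Str.isIn keyword process_name) then
    "High"
  else if ["monitor", "sensor"].any (fun keyword => PySem.Str.isIn keyword process_name) then
    "Medium"
  else
    "Low"

-- ===== PORT B =====
-- Source B's _KEYWORD_RANK dict (items in insertion order)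
def pvKeywordRank : List (String × Nat) :=
  [("plc", 3), ("scada", 3), ("control", 3),
   ("hmi", 2), ("automation", 2), ("robot", 2),
   ("monitor", 1), ("sensor", 1)]

-- Source B's _LEVEL_OF_RANK dict
def pvLevelOfRank : PySem.Dict Nat String :=
  PySem.Dict.ofList [(3, "Critical"), (2, "High"), (1, "Medium"), (0, "Low")]

def get_process_criticality_py_alt (process_name : String) : String :=
  let name := PySem.Str.lower process_name
  -- max(..., default=0) over the ranks of matching keywords
  let rank := (pvKeywordRank.filter (fun kv => PySem.Str.isIn kv.1 name)).foldl
      (fun a kv => Nat.max a kv.2) 0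
  -- _LEVEL_OF_RANK[rank]; the key rank ∈ {0,1,2,3} is always present, "" is never returned
  (pvLevelOfRank.get? rank).getD ""

-- ===== PRECONDITION & SPEC =====
def Spec_get_process_criticality_py (process_name : String) (out : String) : Prop := out = get_process_criticality_py_alt process_name
instance (process_name : String) (out : String) : Decidable (Spec_get_process_criticality_py process_name out) := by unfold Spec_get_process_criticality_py; infer_instance

-- ===== CLAIM (what is proved, stated in full; the proofs are below) =====
def Claim_equal_get_process_criticality_py : Prop := ∀ (process_name : String), Dom_get_process_criticality_py process_name → Spec_get_process_criticality_py process_name (get_process_criticality_py process_name)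

-- ===== LEMMAS AND PROOFS =====

-- filter over a cons splits into an appended singleton block
theorem pvFilterCons {α : Type} (p : α → Bool) (x : α) (l : List α) :
    List.filter p (x :: l) = (if p x = true then [x] else []) ++ List.filter p l := by
  cases h : p x <;> simp [h]

-- the whole rank/lookup pipeline, evaluated over the 8 abstract match booleans
theorem pvEval8 : ∀ (b1 b2 b3 b4 b5 b6 b7 b8 : Bool),
    ((pvLevelOfRank.get?
        (List.foldl (fun a kv => Nat.max a kv.2) 0
          ((if b1 = true then [(("plc" : String), (3 : Nat))] else []) ++
           ((if b2 = true then [(("scada" : String), (3 : Nat))] else []) ++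
            ((if b3 = true then [(("control" : String), (3 : Nat))] else []) ++
             ((if b4 = true then [(("hmi" : String), (2 : Nat))] else []) ++
              ((if b5 = true then [(("automation" : String), (2 : Nat))] else []) ++
               ((if b6 = true then [(("robot" : String), (2 : Nat))] else []) ++
                ((if b7 = true then [(("monitor" : String), (1 : Nat))] else []) ++
                 (if b8 = true then [(("sensor" : String), (1 : Nat))] else [])))))))))).getD "")
    = (if (b1 || (b2 || (b3 || false))) = true then "Critical"
       else if (b4 || (b5 || (b6 || false))) = true then "High"
       else if (b7 || (b8 || false)) = true then "Medium"
       else "Low") := by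
  decide

-- ===== VERDICT (by name: the statement is the Claim_ definition above) =====
theorem get_process_criticality_py_spec : Claim_equal_get_process_criticality_py := by
  intro s _
  unfold Spec_get_process_criticality_py
  simp only [get_process_criticality_py_alt, pvKeywordRank, pvFilterCons, List.filter_nil]
  rw [List.append_nil, pvEval8]
  simp only [get_process_criticality_py, List.any_cons, List.any_nil]
  rfl
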